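-- pv_equiv track=rewrite | github.com/broadinstitute/stp_segmentation_wdl | docker/mac/tile_for_mac/utils.py | tile_coords
-- ===== SOURCE A (Python) =====
-- def tile_coords(image_height, image_width,
--                 tile_height, tile_width,
--                 overlap):
--
--     """This function returns a list of tile coordinates from a larger image.
--
--     Parameters
--     -----------
--     image_height: Height of original large image
--     image_width: Width of original large image
--     tile_height: Height of tile
--     tile_width: Width of tile
--
--     Returns
--     -----------
--     tile_boundaries_list: list of list containing min/max coordinates of each tile
--     """
--
--     tile_boundaries_list = []
--
--     y_min = 0
--     while y_min < image_height:
--         y_max = min(y_min + tile_height, image_height)  # Adjust y_max if it exceeds image height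
--
--         x_min = 0
--         while x_min < image_width:
--             x_max = min(x_min + tile_width, image_width)  # Adjust x_max if it exceeds image width
--
--             #tile_boundaries_list.append(y_min, y_max, x_min, x_max)
--
--             tile_boundaries_list.append(f"{y_min}, {y_max}, {x_min}, {x_max}")
--
--             x_min += (tile_width - overlap)  # Move to the next tile with overlap
--
--         y_min += (tile_height - overlap)  # Move to the next row of tiles with overlap
--
--     return tile_boundaries_list
-- ===== SOURCE B (Python) =====
-- def tile_coords(image_height, image_width,
--                 tile_height, tile_width,
--                 overlap):
--     # Build axis breakpoints once per axis, then combine.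
--     y_spans = []
--     y = 0
--     while y < image_height:
--         y_spans.append((y, min(y + tile_height, image_height)))
--         y += tile_height - overlap
--
--     if not y_spans:
--         return []
--
--     x_spans = []
--     x = 0
--     while x < image_width:
--         x_spans.append((x, min(x + tile_width, image_width)))
--         x += tile_width - overlap
--
--     return [f"{y0}, {y1}, {x0}, {x1}"
--             for (y0, y1) in y_spans
--             for (x0, x1) in x_spans]
-- ===== Notes on version B (the rewrite author's own statement) =====
-- stated objective: alternative
-- what changed: B computes each axis's (min,max) spans in its own single while-loop pass and then emits the Cartesian product with a nested comprehension, instead of A's two nested while loops that recompute the x sweep inside every y iteration.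
import Mathlib
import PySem

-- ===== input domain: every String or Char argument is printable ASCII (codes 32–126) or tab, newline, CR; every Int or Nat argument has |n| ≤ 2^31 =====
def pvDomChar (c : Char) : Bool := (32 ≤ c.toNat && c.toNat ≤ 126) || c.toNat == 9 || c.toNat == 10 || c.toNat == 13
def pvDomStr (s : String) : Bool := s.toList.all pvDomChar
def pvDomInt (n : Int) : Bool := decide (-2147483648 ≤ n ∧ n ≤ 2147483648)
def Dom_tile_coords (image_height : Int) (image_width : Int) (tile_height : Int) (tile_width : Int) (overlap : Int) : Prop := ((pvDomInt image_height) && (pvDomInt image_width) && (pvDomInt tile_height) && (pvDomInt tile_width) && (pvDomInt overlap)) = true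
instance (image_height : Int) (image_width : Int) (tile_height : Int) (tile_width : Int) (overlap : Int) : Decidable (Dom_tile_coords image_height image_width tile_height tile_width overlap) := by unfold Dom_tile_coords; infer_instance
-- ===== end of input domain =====

-- B separates per-axis span computation from the Cartesian emission (A interleaves them in
-- nested while loops); same output, proved equal wherever A terminates.
-- Python's list.append is ported as a reversed accumulator (cons, then reverse at the end).

-- f"{a}, {b}, {c}, {d}"
def fmtTile (a b c d : Int) : String :=
  PySem.Int.toStr a ++ ", " ++ PySem.Int.toStr b ++ ", " ++ PySem.Int.toStr c ++ ", " ++ PySem.Int.toStr d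

-- ===== PORT A =====
-- inner 'while x_min < image_width' loop, appending to the shared accumulator (reversed);
-- the step ≤ 0 branch is a totality guard only (there the Python while loop never exits).
def tcInnerA (image_width tile_width overlap y_min y_max x_min : Int) (acc : List String) : List String :=
  if _h : x_min < image_width then
    let x_max := min (x_min + tile_width) image_width
    let acc' := fmtTile y_min y_max x_min x_max :: acc
    if _hs : tile_width - overlap ≤ 0 then acc'
    else tcInnerA image_width tile_width overlap y_min y_max (x_min + (tile_width - overlap)) acc'
  else acc
termination_by (image_width - x_min).toNat
decreasing_by omega

-- outer 'while y_min < image_height' loop; same totality guard for step ≤ 0.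
def tcOuterA (image_height image_width tile_height tile_width overlap y_min : Int) (acc : List String) : List String :=
  if _h : y_min < image_height then
    let y_max := min (y_min + tile_height) image_height
    let acc' := tcInnerA image_width tile_width overlap y_min y_max 0 acc
    if _hs : tile_height - overlap ≤ 0 then acc'
    else tcOuterA image_height image_width tile_height tile_width overlap (y_min + (tile_height - overlap)) acc'
  else acc
termination_by (image_height - y_min).toNat
decreasing_by omega

def tile_coords (image_height : Int) (image_width : Int) (tile_height : Int) (tile_width : Int) (overlap : Int) : List String :=
  (tcOuterA image_height image_width tile_height tile_width overlap 0 []).reverse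

-- ===== PORT B =====
-- one axis pass: append (v, min (v+size) limit) while v < limit, stepping by size - overlap
-- (accumulator reversed); the step ≤ 0 branch is the same totality guard (there the Python while loop never exits).
def tcSpans (limit size overlap v : Int) (acc : List (Int × Int)) : List (Int × Int) :=
  if _h : v < limit then
    let acc' := (v, min (v + size) limit) :: acc
    if _hs : size - overlap ≤ 0 then acc'
    else tcSpans limit size overlap (v + (size - overlap)) acc'
  else acc
termination_by (limit - v).toNat
decreasing_by omega

def tile_coords_alt (image_height : Int) (image_width : Int) (tile_height : Int) (tile_width : Int) (overlap : Int) : List String :=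
  let y_spans := (tcSpans image_height tile_height overlap 0 []).reverse
  if y_spans = [] then []
  else
    let x_spans := (tcSpans image_width tile_width overlap 0 []).reverse
    y_spans.flatMap (fun p => x_spans.map (fun q => fmtTile p.1 p.2 q.1 q.2))

-- ===== PRECONDITION & SPEC =====
def Spec_tile_coords (image_height : Int) (image_width : Int) (tile_height : Int) (tile_width : Int) (overlap : Int) (out : List String) : Prop := out = tile_coords_alt image_height image_width tile_height tile_width overlap
instance (image_height : Int) (image_width : Int) (tile_height : Int) (tile_width : Int) (overlap : Int) (out : List String) : Decidable (Spec_tile_coords image_height image_width tile_height tile_width overlap out) := by unfold Spec_tile_coords; infer_instance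

-- ===== CLAIM (what is proved, stated in full; the proofs are below) =====
def Claim_equal_tile_coords : Prop := ∀ (image_height : Int) (image_width : Int) (tile_height : Int) (tile_width : Int) (overlap : Int), Dom_tile_coords image_height image_width tile_height tile_width overlap → Spec_tile_coords image_height image_width tile_height tile_width overlap (tile_coords image_height image_width tile_height tile_width overlap)

-- ===== LEMMAS AND PROOFS =====

-- proof-only, accumulator-free description of one axis sweep
def spansP (limit size overlap v : Int) : List (Int × Int) :=
  if _h : v < limit then
    if _hs : size - overlap ≤ 0 then [(v, min (v + size) limit)]
    else (v, min (v + size) limit) :: spansP limit size overlap (v + (size - overlap))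
  else []
termination_by (limit - v).toNat
decreasing_by omega

theorem tcSpans_eq (limit size ov v : Int) (acc : List (Int × Int)) :
    tcSpans limit size ov v acc = (spansP limit size ov v).reverse ++ acc := by
  fun_induction spansP limit size ov v generalizing acc with
  | case1 v h hs => rw [tcSpans]; simp [h, hs]
  | case2 v h hs ih => rw [tcSpans]; simp [h, hs, ih]
  | case3 v h => rw [tcSpans]; simp [h]

theorem tcInnerA_eq (w tw ov ymin ymax x : Int) (acc : List String) :
    tcInnerA w tw ov ymin ymax x acc
      = ((spansP w tw ov x).map (fun q => fmtTile ymin ymax q.1 q.2)).reverse ++ acc := by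
  fun_induction spansP w tw ov x generalizing acc with
  | case1 v h hs => rw [tcInnerA]; simp [h, hs]
  | case2 v h hs ih => rw [tcInnerA]; simp [h, hs, ih]
  | case3 v h => rw [tcInnerA]; simp [h]

theorem tcOuterA_eq (h w th tw ov y : Int) (acc : List String) :
    tcOuterA h w th tw ov y acc
      = ((spansP h th ov y).flatMap
          (fun p => (spansP w tw ov 0).map (fun q => fmtTile p.1 p.2 q.1 q.2))).reverse ++ acc := by
  fun_induction spansP h th ov y generalizing acc with
  | case1 v hv hs => rw [tcOuterA]; simp [hv, hs, tcInnerA_eq]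
  | case2 v hv hs ih => rw [tcOuterA]; simp [hv, hs, tcInnerA_eq, ih]
  | case3 v hv => rw [tcOuterA]; simp [hv]

-- ===== VERDICT (by name: the statement is the Claim_ definition above) =====
theorem tile_coords_spec : Claim_equal_tile_coords := by
  intro h w th tw ov _dom
  unfold Spec_tile_coords tile_coords tile_coords_alt
  rw [tcOuterA_eq, tcSpans_eq, tcSpans_eq]
  by_cases hy : spansP h th ov 0 = []
  · simp [hy]
  · simp [hy]
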